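-- pv_equiv track=rewrite | github.com/Shiba-2-shiba/wildcard_tagnodes | pose_emotion_tag.py | _build_theme_bias
-- ===== SOURCE A (Python) =====
-- from typing import Dict, Iterable, List, Optional, Sequence, Set, Tuple
--
-- def _theme_tag_groups(theme_pack: Optional[Dict[str, object]]) -> List[Tuple[str, List[str]]]:
--     groups: List[Tuple[str, List[str]]] = []
--     if not theme_pack:
--         return groups
--
--     tags_section = theme_pack.get("tags", {}) if isinstance(theme_pack, dict) else {}
--     if isinstance(tags_section, dict):
--         for group_name, values in tags_section.items():
--             if not values:
--                 continue
--             cleaned = [tag for tag in values if tag]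
--             if cleaned:
--                 groups.append((group_name, cleaned))
--     return groups
--
-- def _build_theme_bias(theme_pack: Optional[Dict[str, object]], pools: Dict[str, List[str]]) -> Dict[str, List[str]]:
--     bias: Dict[str, List[str]] = {name: [] for name in pools.keys()}
--     if not theme_pack:
--         return bias
--
--     for _, tags in _theme_tag_groups(theme_pack):
--         for tag in tags:
--             for pool_name, pool in pools.items():
--                 if tag in pool and tag not in bias[pool_name]:
--                     bias[pool_name].append(tag)
--     return bias
-- ===== SOURCE B (Python) =====
-- def _build_theme_bias(theme_pack, pools):
--     tags_section = theme_pack.get("tags", {}) if theme_pack else {}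
--     all_tags = [tag for values in tags_section.values() for tag in values if tag]
--     bias = {}
--     for name, pool in pools.items():
--         pool_set = set(pool)
--         bias[name] = list(dict.fromkeys(tag for tag in all_tags if tag in pool_set))
--     return bias
-- ===== Notes on version B (the rewrite author's own statement) =====
-- stated objective: alternative
-- what changed: B flattens the truthy theme tags once, then builds each pool's bias list independently in one pass using a set for pool membership and dict.fromkeys for ordered dedup, instead of A's per-tag inner loop over all pools with list scans of the pool and of the growing bias list.
import Mathlib
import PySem

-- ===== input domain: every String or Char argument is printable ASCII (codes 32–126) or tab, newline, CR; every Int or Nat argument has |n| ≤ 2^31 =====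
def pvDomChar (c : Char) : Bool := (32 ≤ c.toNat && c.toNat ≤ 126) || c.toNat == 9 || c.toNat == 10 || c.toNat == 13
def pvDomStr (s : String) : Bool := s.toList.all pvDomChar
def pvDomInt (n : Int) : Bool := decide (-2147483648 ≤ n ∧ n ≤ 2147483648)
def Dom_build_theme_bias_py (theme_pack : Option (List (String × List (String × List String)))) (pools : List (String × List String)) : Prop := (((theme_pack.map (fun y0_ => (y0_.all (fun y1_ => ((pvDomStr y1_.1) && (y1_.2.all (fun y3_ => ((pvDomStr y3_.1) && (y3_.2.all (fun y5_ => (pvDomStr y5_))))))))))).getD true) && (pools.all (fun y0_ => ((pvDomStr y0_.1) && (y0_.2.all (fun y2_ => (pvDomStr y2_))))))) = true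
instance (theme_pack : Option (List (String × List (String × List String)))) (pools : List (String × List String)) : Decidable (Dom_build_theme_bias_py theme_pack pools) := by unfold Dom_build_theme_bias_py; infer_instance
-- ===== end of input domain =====

-- B replaces A's per-tag inner loop over all pools (with list scans of the pool and of the
-- growing bias list) by one flattened tag list and, per pool, a single filtered ordered dedup
-- with set membership (alternative structure, similar cost). Equal return value on all inputs.

-- ===== PORT A =====
def theme_tag_groups_py (theme_pack : Option (List (String × List (String × List String)))) : List (String × List String) :=
  match theme_pack with
  | none => []
  | some l =>
    if l = [] then []
    else
      let tags_section := (PySem.Dict.ofList l).getD "tags" []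
      (PySem.Dict.ofList tags_section).items.foldl (fun groups q =>
        if q.2 = [] then groups
        else
          let cleaned := q.2.filter (fun t => !(t == ""))
          if cleaned = [] then groups else groups ++ [(q.1, cleaned)]) []

def build_theme_bias_py (theme_pack : Option (List (String × List (String × List String)))) (pools : List (String × List String)) : List (String × List String) :=
  let poolsD := PySem.Dict.ofList pools
  let bias0 : PySem.Dict String (List String) :=
    poolsD.keys.foldl (fun d name => d.insert name []) PySem.Dict.empty
  match theme_pack with
  | none => bias0.items
  | some l =>
    if l = [] then bias0.items
    else
      ((theme_tag_groups_py (some l)).foldl (fun b g =>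
        g.2.foldl (fun b tag =>
          poolsD.items.foldl (fun b q =>
            if tag ∈ q.2 ∧ tag ∉ b.getD q.1 [] then b.modify q.1 [] (· ++ [tag]) else b) b) b) bias0).items

-- ===== PORT B =====
def build_theme_bias_py_alt (theme_pack : Option (List (String × List (String × List String)))) (pools : List (String × List String)) : List (String × List String) :=
  let tags_section : List (String × List String) :=
    match theme_pack with
    | none => []
    | some l => if l = [] then [] else (PySem.Dict.ofList l).getD "tags" []
  let all_tags := (PySem.Dict.ofList tags_section).values.flatMap (fun vs => vs.filter (fun t => !(t == "")))
  ((PySem.Dict.ofList pools).items.foldl (fun (b : PySem.Dict String (List String)) q =>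
      let poolSet : PySem.Set String := PySem.Set.ofList q.2
      b.insert q.1 (PySem.List.dedup (all_tags.filter (fun t => PySem.Set.contains poolSet t)))) PySem.Dict.empty).items

-- ===== PRECONDITION & SPEC =====
def Spec_build_theme_bias_py (theme_pack : Option (List (String × List (String × List String)))) (pools : List (String × List String)) (out : List (String × List String)) : Prop := out = build_theme_bias_py_alt theme_pack pools
instance (theme_pack : Option (List (String × List (String × List String)))) (pools : List (String × List String)) (out : List (String × List String)) : Decidable (Spec_build_theme_bias_py theme_pack pools out) := by unfold Spec_build_theme_bias_py; infer_instance

-- ===== CLAIM (what is proved, stated in full; the proofs are below) =====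
def Claim_equal_build_theme_bias_py : Prop := ∀ (theme_pack : Option (List (String × List (String × List String)))) (pools : List (String × List String)), Dom_build_theme_bias_py theme_pack pools → Spec_build_theme_bias_py theme_pack pools (build_theme_bias_py theme_pack pools)

-- ===== LEMMAS AND PROOFS =====


-- A's inner loop over the pool entries, for one tag
def pvStepA (pd : List (String × List String)) (b : PySem.Dict String (List String)) (tag : String) : PySem.Dict String (List String) :=
  pd.foldl (fun b q =>
    if tag ∈ q.2 ∧ tag ∉ b.getD q.1 [] then b.modify q.1 [] (· ++ [tag]) else b) b

theorem pvStepA_contains (pd : List (String × List String)) (b : PySem.Dict String (List String)) (tag : String)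
    (hsub : ∀ p ∈ pd, b.contains p.1 = true) (k' : String) :
    (pvStepA pd b tag).contains k' = b.contains k' := by
  induction pd generalizing b with
  | nil => rfl
  | cons q rest ih =>
    simp only [pvStepA, List.foldl_cons] at ih ⊢
    have hc : ∀ x, (b.modify q.1 [] (· ++ [tag])).contains x = b.contains x := by
      intro x
      rw [PySem.Dict.contains_modify]
      by_cases hx : x = q.1
      · subst hx; simp [hsub q (List.mem_cons_self ..)]
      · simp [hx]
    split
    · rw [ih _ (fun p hp => by rw [hc]; exact hsub p (List.mem_cons_of_mem _ hp)), hc]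
    · exact ih _ (fun p hp => hsub p (List.mem_cons_of_mem _ hp))

theorem pvStepA_keys (pd : List (String × List String)) (b : PySem.Dict String (List String)) (tag : String)
    (hsub : ∀ p ∈ pd, b.contains p.1 = true) :
    (pvStepA pd b tag).keys = b.keys := by
  induction pd generalizing b with
  | nil => rfl
  | cons q rest ih =>
    simp only [pvStepA, List.foldl_cons] at ih ⊢
    have hc : ∀ x, (b.modify q.1 [] (· ++ [tag])).contains x = b.contains x := by
      intro x
      rw [PySem.Dict.contains_modify]
      by_cases hx : x = q.1
      · subst hx; simp [hsub q (List.mem_cons_self ..)]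
      · simp [hx]
    split
    · rw [ih _ (fun p hp => by rw [hc]; exact hsub p (List.mem_cons_of_mem _ hp))]
      rw [PySem.Dict.keys_modify,
        PySem.Dict.keys_insert_of_contains _ _ (hsub q (List.mem_cons_self ..))]
    · exact ih _ (fun p hp => hsub p (List.mem_cons_of_mem _ hp))

theorem pvStepA_getD_not_mem (pd : List (String × List String)) (b : PySem.Dict String (List String)) (tag k : String)
    (hk : k ∉ pd.map (·.1)) : (pvStepA pd b tag).getD k [] = b.getD k [] := by
  induction pd generalizing b with
  | nil => rfl
  | cons q rest ih =>
    simp only [List.map_cons, List.mem_cons, not_or] at hk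
    simp only [pvStepA, List.foldl_cons] at ih ⊢
    rw [ih _ hk.2]
    split
    · rw [PySem.Dict.getD_modify, if_neg hk.1]
    · rfl

theorem pvStepA_getD (pd : List (String × List String)) (hnd : (pd.map (·.1)).Nodup)
    (b : PySem.Dict String (List String)) (tag k : String) (pool : List String) (hmem : (k, pool) ∈ pd) :
    (pvStepA pd b tag).getD k [] =
      if tag ∈ pool ∧ tag ∉ b.getD k [] then b.getD k [] ++ [tag] else b.getD k [] := by
  induction pd generalizing b with
  | nil => simp at hmem
  | cons q rest ih =>
    simp only [List.map_cons, List.nodup_cons] at hnd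
    simp only [pvStepA, List.foldl_cons] at ih ⊢
    rcases List.mem_cons.1 hmem with h | h
    · subst h
      have hk : k ∉ rest.map (·.1) := hnd.1
      have hrest := fun b' => pvStepA_getD_not_mem rest b' tag k hk
      simp only [pvStepA] at hrest
      rw [hrest]
      split
      · rw [PySem.Dict.getD_modify, if_pos rfl]
      · rfl
    · have hne : k ≠ q.1 := by
        intro he
        exact hnd.1 (he ▸ (List.mem_map.2 ⟨(k, pool), h, rfl⟩))
      split
      · rw [ih hnd.2 _ h, PySem.Dict.getD_modify, if_neg hne]
      · rw [ih hnd.2 _ h]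

theorem pvFold_keys (pd : List (String × List String)) (ats : List String) (b : PySem.Dict String (List String))
    (hsub : ∀ p ∈ pd, b.contains p.1 = true) :
    (ats.foldl (pvStepA pd) b).keys = b.keys := by
  induction ats generalizing b with
  | nil => rfl
  | cons t ts ih =>
    simp only [List.foldl_cons]
    rw [ih _ (fun p hp => by rw [pvStepA_contains pd b t hsub]; exact hsub p hp),
      pvStepA_keys pd b t hsub]

theorem pvFold_getD (pd : List (String × List String)) (hnd : (pd.map (·.1)).Nodup)
    (ats : List String) (b : PySem.Dict String (List String)) (k : String) (pool : List String)
    (hmem : (k, pool) ∈ pd) :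
    ((ats.foldl (pvStepA pd) b).getD k []) =
      ats.foldl (fun acc t => if t ∈ pool ∧ t ∉ acc then acc ++ [t] else acc) (b.getD k []) := by
  induction ats generalizing b with
  | nil => rfl
  | cons t ts ih =>
    simp only [List.foldl_cons]
    rw [ih, pvStepA_getD pd hnd b t k pool hmem]

theorem pvAcc_dedup (ats pool : List String) :
    ats.foldl (fun acc t => if t ∈ pool ∧ t ∉ acc then acc ++ [t] else acc) [] =
      PySem.List.dedup (ats.filter (fun t => PySem.Set.contains (PySem.Set.ofList pool) t)) := by
  have hp : ∀ t : String, (PySem.Set.contains (PySem.Set.ofList pool) t) = decide (t ∈ pool) := by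
    intro t
    by_cases h : t ∈ pool
    · simp [h]
    · simp only [h, decide_false]
      rw [← Bool.not_eq_true]
      intro hc
      exact h ((PySem.Set.mem_ofList _ _).1 ((PySem.Set.contains_iff _ _).1 hc))
  rw [PySem.List.dedup_eq_ofList, PySem.Set.ofList_eq_foldl]
  have : ats.filter (fun t => PySem.Set.contains (PySem.Set.ofList pool) t)
      = ats.filter (fun t => decide (t ∈ pool)) := by
    exact List.filter_congr (fun t _ => hp t)
  rw [this, ← PySem.List.foldl_ite_eq_foldl_filter (p := fun t => t ∈ pool)]
  have hf : (fun (acc : List String) t => if t ∈ pool ∧ t ∉ acc then acc ++ [t] else acc)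
      = (fun acc t => if t ∈ pool then PySem.Set.add acc t else acc) := by
    funext acc t
    rw [PySem.Set.add_eq_ite]
    by_cases h1 : t ∈ pool <;> by_cases h2 : t ∈ acc <;> simp [h1, h2]
  rw [hf]

theorem pvBias0_items (pools : List (String × List String)) :
    ((PySem.Dict.ofList pools).keys.foldl (fun (d : PySem.Dict String (List String)) name => d.insert name []) PySem.Dict.empty).items
      = (PySem.Dict.ofList pools).keys.map (fun k => (k, ([] : List String))) := by
  have h := PySem.Dict.items_foldl_insert_fresh (PySem.Dict.ofList pools).keys (fun a => a)
    (fun _ => ([] : List String)) PySem.Dict.empty (fun a _ => PySem.Dict.contains_empty a)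
    (by rw [List.map_id']
        exact PySem.Dict.nodup_keys_ofList pools)
  simp at h
  exact h

theorem pvBchar (pools : List (String × List String)) (all_tags : List String) :
    (((PySem.Dict.ofList pools).items.foldl (fun (b : PySem.Dict String (List String)) q =>
        b.insert q.1 (PySem.List.dedup (all_tags.filter (fun t => PySem.Set.contains (PySem.Set.ofList q.2) t)))) PySem.Dict.empty).items)
      = (PySem.Dict.ofList pools).items.map (fun q =>
          (q.1, PySem.List.dedup (all_tags.filter (fun t => PySem.Set.contains (PySem.Set.ofList q.2) t)))) := by
  rw [PySem.Dict.items_foldl_insert_fresh (PySem.Dict.ofList pools).items (fun q => q.1)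
    (fun q => PySem.List.dedup (all_tags.filter (fun t => PySem.Set.contains (PySem.Set.ofList q.2) t)))
    PySem.Dict.empty (fun a _ => PySem.Dict.contains_empty a.1) (PySem.Dict.nodup_keys_ofList pools)]
  have he : (PySem.Dict.empty : PySem.Dict String (List String)).items = [] := rfl
  rw [he, List.nil_append]

theorem pvMain (pools : List (String × List String)) (ats : List String) :
    ((ats.foldl (pvStepA (PySem.Dict.ofList pools).items)
        ((PySem.Dict.ofList pools).keys.foldl (fun (d : PySem.Dict String (List String)) name => d.insert name []) PySem.Dict.empty)).items)
      = (PySem.Dict.ofList pools).items.map (fun q =>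
          (q.1, PySem.List.dedup (ats.filter (fun t => PySem.Set.contains (PySem.Set.ofList q.2) t)))) := by
  set pd := (PySem.Dict.ofList pools).items with hpd
  set b0 := (PySem.Dict.ofList pools).keys.foldl (fun (d : PySem.Dict String (List String)) name => d.insert name []) PySem.Dict.empty with hb0
  have hndk : (PySem.Dict.ofList pools).keys.Nodup := PySem.Dict.nodup_keys_ofList pools
  have hkeyseq : pd.map (·.1) = (PySem.Dict.ofList pools).keys := rfl
  have hnd : (pd.map (·.1)).Nodup := hkeyseq ▸ hndk
  have hb0items : b0.items = pd.map (fun q => (q.1, ([] : List String))) := by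
    rw [hb0, pvBias0_items pools, ← hkeyseq, List.map_map]
    rfl
  have hb0keys : b0.keys = pd.map (·.1) := by
    show b0.items.map (·.1) = _
    rw [hb0items, List.map_map]
    rfl
  have hb0nd : b0.keys.Nodup := by rw [hb0keys]; exact hnd
  have hsub : ∀ p ∈ pd, b0.contains p.1 = true := by
    intro p hp
    rw [PySem.Dict.contains_iff_mem_keys, hb0keys]
    exact List.mem_map.2 ⟨p, hp, rfl⟩
  have hb0getD : ∀ p ∈ pd, b0.getD p.1 [] = [] := by
    intro p hp
    exact PySem.Dict.getD_of_mem_items b0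
      (by rw [hb0items]; exact List.mem_map.2 ⟨p, hp, rfl⟩) hb0nd []
  set d := ats.foldl (pvStepA pd) b0 with hd
  have hdkeys : d.keys = pd.map (·.1) := by rw [hd, pvFold_keys pd ats b0 hsub, hb0keys]
  have hdnd : d.keys.Nodup := by rw [hdkeys]; exact hnd
  rw [PySem.Dict.items_eq_map_keys d hdnd [], hdkeys, List.map_map]
  apply List.map_congr_left
  intro q hq
  have hgd : d.getD q.1 [] = PySem.List.dedup (ats.filter (fun t => PySem.Set.contains (PySem.Set.ofList q.2) t)) := by
    rw [hd, pvFold_getD pd hnd ats b0 q.1 q.2 (by simpa using hq), hb0getD q hq, pvAcc_dedup]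
  simp only [Function.comp_apply, hgd]

theorem pvFold_flat {β : Type} (groups : List (String × List String)) (f : β → String → β) (b : β) :
    groups.foldl (fun b g => g.2.foldl f b) b = (groups.flatMap (·.2)).foldl f b := by
  induction groups generalizing b with
  | nil => rfl
  | cons g rest ih => simp [List.foldl_cons, ih, List.flatMap_cons, List.foldl_append]

theorem pvGroups_flat (items acc : List (String × List String)) :
    (items.foldl (fun groups q =>
        if q.2 = [] then groups
        else
          let cleaned := q.2.filter (fun t => !(t == ""))
          if cleaned = [] then groups else groups ++ [(q.1, cleaned)]) acc).flatMap (·.2)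
      = acc.flatMap (·.2) ++ items.flatMap (fun q => q.2.filter (fun t => !(t == ""))) := by
  induction items generalizing acc with
  | nil => simp
  | cons q rest ih =>
    simp only [List.foldl_cons, List.flatMap_cons]
    rw [ih]
    by_cases h1 : q.2 = []
    · simp [h1]
    · rw [if_neg h1]
      by_cases h2 : q.2.filter (fun t => !(t == "")) = []
      · simp [h2]
      · simp [h2, List.flatMap_append]

theorem pvAllTags_none :
    ((PySem.Dict.ofList ([] : List (String × List String))).values.flatMap
      (fun vs => vs.filter (fun t => !(t == "")))) = [] := rfl

theorem pvMain' (pools : List (String × List String)) (ats : List String) :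
    ((ats.foldl (fun b tag =>
        (PySem.Dict.ofList pools).items.foldl (fun b q =>
          if tag ∈ q.2 ∧ tag ∉ b.getD q.1 [] then b.modify q.1 [] (· ++ [tag]) else b) b)
        ((PySem.Dict.ofList pools).keys.foldl (fun (d : PySem.Dict String (List String)) name => d.insert name []) PySem.Dict.empty)).items)
      = (PySem.Dict.ofList pools).items.map (fun q =>
          (q.1, PySem.List.dedup (ats.filter (fun t => PySem.Set.contains (PySem.Set.ofList q.2) t)))) := by
  have hf : (fun (b : PySem.Dict String (List String)) (tag : String) =>
      (PySem.Dict.ofList pools).items.foldl (fun b q =>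
        if tag ∈ q.2 ∧ tag ∉ b.getD q.1 [] then b.modify q.1 [] (· ++ [tag]) else b) b)
      = pvStepA (PySem.Dict.ofList pools).items := rfl
  rw [hf]
  exact pvMain pools ats

-- ===== VERDICT (by name: the statement is the Claim_ definition above) =====
theorem build_theme_bias_py_spec : Claim_equal_build_theme_bias_py := by
  intro tp pools _
  unfold Spec_build_theme_bias_py
  cases tp with
  | none =>
    simp only [build_theme_bias_py, build_theme_bias_py_alt, pvAllTags_none]
    rw [pvBchar pools []]
    have h := pvMain' pools []
    simpa using h
  | some l =>
    by_cases hl : l = []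
    · subst hl
      simp only [build_theme_bias_py, build_theme_bias_py_alt, reduceIte, pvAllTags_none]
      rw [pvBchar pools []]
      have h := pvMain' pools []
      simpa using h
    · simp only [build_theme_bias_py, build_theme_bias_py_alt, if_neg hl]
      rw [pvFold_flat, pvMain', pvBchar]
      have hats : (theme_tag_groups_py (some l)).flatMap (·.2)
          = ((PySem.Dict.ofList ((PySem.Dict.ofList l).getD "tags" [])).values.flatMap
              (fun vs => vs.filter (fun t => !(t == "")))) := by
        simp only [theme_tag_groups_py, if_neg hl]
        rw [pvGroups_flat]
        have hv : (PySem.Dict.ofList ((PySem.Dict.ofList l).getD "tags" [])).values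
            = (PySem.Dict.ofList ((PySem.Dict.ofList l).getD "tags" [])).items.map (·.2) := rfl
        rw [hv, List.flatMap_map]
        simp

      rw [hats]
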